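-- pv_equiv track=rewrite | github.com/zydezu/pythoncodeuni | 2024-01-19 - January Assessment/SOF1-2023-24-ExamModelAnswers/question_1.py | string_pattern
-- ===== SOURCE A (Python) =====
-- def string_pattern(size):
--     """Creates a X pattern using + and - symbols.
--
--     Args:
--         size (int): The size of the X pattern
--
--     Raises:
--         ValueError: If the size provided is smaller or equal to 2.
--
--     Returns:
--         str: A X pattern using + and - symbols
--     """
--     if size < 3:
--         raise ValueError("Invalid size." )
--     pattern = ""
--     for row in range(size):
--         for column in range(size):
--             if row == column or column == size -1 - row:
--                 pattern += "+"
--             else: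
--                 pattern += "-"
--         pattern += "\n"
--     return pattern
-- ===== SOURCE B (Python) =====
-- def string_pattern(size):
--     """Creates a X pattern using + and - symbols (direct diagonal placement)."""
--     if size < 3:
--         raise ValueError("Invalid size.")
--     lines = []
--     for row in range(size):
--         chars = ['-'] * size
--         chars[row] = '+'
--         chars[size - 1 - row] = '+'
--         lines.append(''.join(chars) + '\n')
--     return ''.join(lines)
-- ===== Notes on version B (the rewrite author's own statement) =====
-- stated objective: faster
-- what changed: Replaces the per-cell inner loop (size comparisons per row) by building a row of dashes and directly setting the two diagonal indices, joining rows at the end instead of repeated string concatenation.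
import Mathlib
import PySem

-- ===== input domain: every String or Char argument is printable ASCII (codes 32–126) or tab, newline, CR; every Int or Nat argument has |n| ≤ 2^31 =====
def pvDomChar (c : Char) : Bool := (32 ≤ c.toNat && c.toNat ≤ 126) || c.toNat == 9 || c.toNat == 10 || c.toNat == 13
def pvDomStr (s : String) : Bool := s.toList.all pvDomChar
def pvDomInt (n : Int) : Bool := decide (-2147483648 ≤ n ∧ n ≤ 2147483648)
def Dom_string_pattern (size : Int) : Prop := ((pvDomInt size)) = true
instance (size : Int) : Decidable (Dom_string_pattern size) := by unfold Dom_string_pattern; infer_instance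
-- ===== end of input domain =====

-- B replaces the per-cell inner loop by building a row of dashes and setting the two diagonal
-- indices directly, joining the rows at the end (objective: faster, constant-factor).

-- ===== PORT A =====
-- A builds one string by appending a char per cell; ported on List Char (Python str = char sequence), exact.
def string_pattern (size : Int) : String :=
  String.ofList ((PySem.List.pyRange 0 size 1).foldl (fun pattern row =>
    ((PySem.List.pyRange 0 size 1).foldl (fun p column =>
      if row = column ∨ column = size - 1 - row then p ++ ['+'] else p ++ ['-']) pattern) ++ ['\n'])
    [])

-- ===== PORT B =====
-- ['-'] * size → List.replicate; chars[i] = '+' → List.set (indices are in [0, size) under Pre_, so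
-- .toNat is exact); ''.join(lines) of per-row strings → flatten of the mapped rows.
def string_pattern_alt (size : Int) : String :=
  String.ofList (((PySem.List.pyRange 0 size 1).map (fun row =>
    (((List.replicate size.toNat '-').set row.toNat '+').set (size - 1 - row).toNat '+') ++ ['\n'])).flatten)

-- ===== PRECONDITION & SPEC =====
-- Both A and B raise ValueError for size < 3.
def Pre_string_pattern (size : Int) : Prop := 3 ≤ size
instance (size : Int) : Decidable (Pre_string_pattern size) := by unfold Pre_string_pattern; infer_instance
def pvWitness_string_pattern : Int := 4

def Spec_string_pattern (size : Int) (out : String) : Prop := out = string_pattern_alt size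
instance (size : Int) (out : String) : Decidable (Spec_string_pattern size out) := by unfold Spec_string_pattern; infer_instance

-- ===== CLAIM (what is proved, stated in full; the proofs are below) =====
def Claim_equal_string_pattern : Prop := ∀ (size : Int), Dom_string_pattern size → Pre_string_pattern size → Spec_string_pattern size (string_pattern size)

-- ===== LEMMAS AND PROOFS =====

-- A's inner cell loop is an append-one-char fold: it maps the predicate over the columns.
theorem foldl_if_append {α : Type} (P : α → Prop) [DecidablePred P] (l : List α) (acc : List Char) :
    l.foldl (fun p c => if P c then p ++ ['+'] else p ++ ['-']) acc
      = acc ++ l.map (fun c => if P c then '+' else '-') := by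
  induction l generalizing acc with
  | nil => simp
  | cons x xs ih => simp [List.foldl_cons, ih]; split_ifs <;> simp

-- The per-row character list A computes equals B's replicate-then-set row.
theorem row_eq (size row : Int) (h0 : 0 ≤ row) (h1 : row < size) :
    (PySem.List.pyRange 0 size 1).map (fun c => if row = c ∨ c = size - 1 - row then '+' else '-')
      = (((List.replicate size.toNat '-').set row.toNat '+').set (size - 1 - row).toNat '+') := by
  apply List.ext_getElem
  · simp [PySem.List.length_pyRange_one]
  · intro i hi _
    have hil : i < size.toNat := by simpa [PySem.List.length_pyRange_one] using hi
    simp only [List.getElem_map, PySem.List.getElem_pyRange_one, List.getElem_set,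
      List.getElem_replicate]
    split_ifs
    all_goals first | rfl | (exfalso; omega)

-- ===== VERDICT (by name: the statement is the Claim_ definition above) =====
theorem string_pattern_spec : Claim_equal_string_pattern := by
  intro size _ _
  show string_pattern size = string_pattern_alt size
  unfold string_pattern string_pattern_alt
  congr 1
  rw [PySem.List.foldl_congr_mem (g := fun pattern row =>
    pattern ++ ((((List.replicate size.toNat '-').set row.toNat '+').set (size - 1 - row).toNat '+') ++ ['\n']))]
  · rw [PySem.List.foldl_append_eq_flatMap]
    simp [List.flatMap_def]
  · intro acc row hmem
    have hb := (PySem.List.mem_pyRange_one.mp hmem)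
    rw [foldl_if_append (fun c => row = c ∨ c = size - 1 - row), row_eq size row hb.1 hb.2]
    simp
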